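-- pv_equiv track=rewrite | github.com/doocs/leetcode | solution/2100-2199/2143.Choose Numbers From Two Arrays in Range/Solution.py | countSubranges
-- ===== SOURCE A (Python) =====
-- from typing import List
--
-- def countSubranges(nums1: List[int], nums2: List[int]) -> int:
--     n = len(nums1)
--     s1, s2 = sum(nums1), sum(nums2)
--     f = [[0] * (s1 + s2 + 1) for _ in range(n)]
--     ans = 0
--     mod = 10**9 + 7
--     for i, (a, b) in enumerate(zip(nums1, nums2)):
--         f[i][a + s2] += 1
--         f[i][-b + s2] += 1
--         if i:
--             for j in range(s1 + s2 + 1):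
--                 if j >= a:
--                     f[i][j] = (f[i][j] + f[i - 1][j - a]) % mod
--                 if j + b < s1 + s2 + 1:
--                     f[i][j] = (f[i][j] + f[i - 1][j + b]) % mod
--         ans = (ans + f[i][s2]) % mod
--     return ans
-- ===== SOURCE B (Python) =====
-- def countSubranges(nums1, nums2):
--     mod = 10**9 + 7
--
--     def count_from(suffix):
--         # zero-sum sign assignments over every range starting at the head of suffix
--         total = 0
--         cnt = {0: 1}
--         for a, b in suffix:
--             nxt = {}
--             for s, c in cnt.items():
--                 for t in (s + a, s - b):
--                     nxt[t] = (nxt.get(t, 0) + c) % mod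
--             cnt = nxt
--             total = (total + cnt.get(0, 0)) % mod
--         return total
--
--     ans = 0
--     pairs = list(zip(nums1, nums2))
--     while pairs:
--         ans = (ans + count_from(pairs)) % mod
--         pairs = pairs[1:]
--     return ans
-- ===== Notes on version B (the rewrite author's own statement) =====
-- stated objective: alternative
-- what changed: Replaces the shared single-pass DP (each index's dense row of length sum(nums1)+sum(nums2)+1 derived from the previous row, all subrange starts folded into one table) by independent brute-force enumeration of start indices: recurse over suffixes of the zipped list and, for each start, rebuild a sparse reachable-sum counter from {0:1} alone, sharing no state between starts.
-- outside the precondition, e.g. on countSubranges([1], [-1]): A returns 2, B returns 0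
import Mathlib
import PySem

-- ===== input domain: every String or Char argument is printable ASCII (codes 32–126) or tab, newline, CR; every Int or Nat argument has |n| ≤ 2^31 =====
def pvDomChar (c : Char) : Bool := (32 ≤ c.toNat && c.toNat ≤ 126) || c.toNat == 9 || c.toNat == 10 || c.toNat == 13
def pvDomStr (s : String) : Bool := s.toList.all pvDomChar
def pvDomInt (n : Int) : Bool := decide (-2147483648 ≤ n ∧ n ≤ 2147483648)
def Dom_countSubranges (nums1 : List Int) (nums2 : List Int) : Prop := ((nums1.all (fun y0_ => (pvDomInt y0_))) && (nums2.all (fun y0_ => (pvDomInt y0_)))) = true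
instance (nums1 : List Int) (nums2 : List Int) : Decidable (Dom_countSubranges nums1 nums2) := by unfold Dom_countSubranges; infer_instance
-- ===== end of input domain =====

-- B abandons A's shared single-pass dense DP table and instead enumerates each start
-- index independently, rebuilding a sparse per-start reachable-sum counter over every
-- suffix of the zipped input: a structurally different (brute-force per start) algorithm.

-- ===== PORT A =====
def countSubranges (nums1 : List Int) (nums2 : List Int) : Int :=
  let n := nums1.length
  let s1 := nums1.sum
  let s2 := nums2.sum
  let md : Int := 1000000007
  let f0 : List (List Int) := List.replicate n (List.replicate (s1 + s2 + 1).toNat 0)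
  let res := (PySem.List.enumerate (List.zip nums1 nums2) 0).foldl
    (fun (st : List (List Int) × Int) iab =>
      let f := st.1
      let i := iab.1; let a := iab.2.1; let b := iab.2.2
      let row := PySem.List.pyGetD f i []
      let row := PySem.List.pySetD row (a + s2) (PySem.List.pyGetD row (a + s2) 0 + 1)
      let row := PySem.List.pySetD row (-b + s2) (PySem.List.pyGetD row (-b + s2) 0 + 1)
      let row := if i ≠ 0 then
          (PySem.List.pyRange 0 (s1 + s2 + 1) 1).foldl (fun r j =>
            let r1 := if j ≥ a then
                PySem.List.pySetD r j (PySem.Int.mod (PySem.List.pyGetD r j 0 +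
                  PySem.List.pyGetD (PySem.List.pyGetD f (i - 1) []) (j - a) 0) md)
              else r
            if j + b < s1 + s2 + 1 then
                PySem.List.pySetD r1 j (PySem.Int.mod (PySem.List.pyGetD r1 j 0 +
                  PySem.List.pyGetD (PySem.List.pyGetD f (i - 1) []) (j + b) 0) md)
              else r1) row
        else row
      let f := PySem.List.pySetD f i row
      (f, PySem.Int.mod (st.2 + PySem.List.pyGetD row s2 0) md))
    (f0, 0)
  res.2

-- ===== PORT B =====
-- helper of Source B: d[k] = (d.get(k, 0) + c) % md
def pvAdd (md : Int) (d : PySem.Dict Int Int) (k c : Int) : PySem.Dict Int Int :=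
  d.insert k (PySem.Int.mod (d.getD k 0 + c) md)

-- Source B's count_from(suffix): zero-sum assignments over ranges starting at the suffix head
def pvCountFrom (md : Int) (suffix : List (Int × Int)) : Int :=
  (suffix.foldl
    (fun (st : PySem.Dict Int Int × Int) ab =>
      let nxt := st.1.items.foldl
        (fun d sc => [sc.1 + ab.1, sc.1 - ab.2].foldl (fun d t => pvAdd md d t sc.2) d)
        PySem.Dict.empty
      (nxt, PySem.Int.mod (st.2 + nxt.getD 0 0) md))
    (PySem.Dict.empty.insert 0 1, 0)).2

-- Source B's while loop: pairs = pairs[1:] each round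
def pvGo (md : Int) : List (Int × Int) → Int → Int
  | [], ans => ans
  | z :: rest, ans => pvGo md rest (PySem.Int.mod (ans + pvCountFrom md (z :: rest)) md)

def countSubranges_alt (nums1 : List Int) (nums2 : List Int) : Int :=
  pvGo 1000000007 (List.zip nums1 nums2) 0

-- ===== PRECONDITION & SPEC =====
-- Pre_ restricts to the problem's natural domain: all elements nonnegative.  With a negative
-- element A indexes its dense rows at possibly negative offsets, so it either raises
-- IndexError or returns an accidental value produced by Python's negative-index wraparound.
def Pre_countSubranges (nums1 : List Int) (nums2 : List Int) : Prop :=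
  (∀ x ∈ nums1, 0 ≤ x) ∧ (∀ x ∈ nums2, 0 ≤ x)
instance (nums1 : List Int) (nums2 : List Int) : Decidable (Pre_countSubranges nums1 nums2) := by
  unfold Pre_countSubranges; infer_instance

def pvWitness_countSubranges : List Int × List Int := ([1, 2, 1], [1, 1, 2])

def Spec_countSubranges (nums1 : List Int) (nums2 : List Int) (out : Int) : Prop := out = countSubranges_alt nums1 nums2
instance (nums1 : List Int) (nums2 : List Int) (out : Int) : Decidable (Spec_countSubranges nums1 nums2 out) := by unfold Spec_countSubranges; infer_instance

-- ===== CLAIM (what is proved, stated in full; the proofs are below) =====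
def Claim_equal_countSubranges : Prop := ∀ (nums1 : List Int) (nums2 : List Int), Dom_countSubranges nums1 nums2 → Pre_countSubranges nums1 nums2 → Spec_countSubranges nums1 nums2 (countSubranges nums1 nums2)

-- ===== LEMMAS AND PROOFS =====

-- the two "new subrange starts here" unit contributions, at signed sums a and -b
def pvOnes (a b v : Int) : Int := (if v = a then 1 else 0) + (if v = -b then 1 else 0)

-- value of a dense row at signed sum v (row index v + s2); 0 below the row
def pvAval (s2 : Int) (row : List Int) (v : Int) : Int :=
  if 0 ≤ v + s2 then row.getD (v + s2).toNat 0 else 0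

-- the per-cell update A's inner range loop performs at index j
def pvRowStep (a b s1 s2 md : Int) (prev : List Int) (x j : Int) : Int :=
  let x1 := if j ≥ a then PySem.Int.mod (x + PySem.List.pyGetD prev (j - a) 0) md else x
  if j + b < s1 + s2 + 1 then PySem.Int.mod (x1 + PySem.List.pyGetD prev (j + b) 0) md else x1

-- the body of A's inner range loop (definitionally the lambda in the port)
def pvBody (a b s1 s2 : Int) (prev : List Int) (r : List Int) (j : Int) : List Int :=
  let r1 := if j ≥ a then
      PySem.List.pySetD r j (PySem.Int.mod (PySem.List.pyGetD r j 0 +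
        PySem.List.pyGetD prev (j - a) 0) 1000000007)
    else r
  if j + b < s1 + s2 + 1 then
      PySem.List.pySetD r1 j (PySem.Int.mod (PySem.List.pyGetD r1 j 0 +
        PySem.List.pyGetD prev (j + b) 0) 1000000007)
    else r1


-- A's freshly initialised row (base = f[i], two unit bumps)
def pvRow2 (s2 a b : Int) (base : List Int) : List Int :=
  PySem.List.pySetD (PySem.List.pySetD base (a + s2) (PySem.List.pyGetD base (a + s2) 0 + 1))
    (-b + s2)
    (PySem.List.pyGetD (PySem.List.pySetD base (a + s2) (PySem.List.pyGetD base (a + s2) 0 + 1))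
      (-b + s2) 0 + 1)

-- the row A stores at step i (inner loop only when i ≠ 0)
def pvRow3 (s1 s2 a b : Int) (f : List (List Int)) (i : Int) : List Int :=
  if i ≠ 0 then
    (PySem.List.pyRange 0 (s1 + s2 + 1) 1).foldl
      (pvBody a b s1 s2 (PySem.List.pyGetD f (i - 1) []))
      (pvRow2 s2 a b (PySem.List.pyGetD f i []))
  else pvRow2 s2 a b (PySem.List.pyGetD f i [])

-- the sequential sparse dict after one step from p (used to bridge A's fold to B)
def pvCur (a b : Int) (p : PySem.Dict Int Int) : PySem.Dict Int Int :=
  p.items.foldl (fun d uc => [uc.1 + a, uc.1 - b].foldl (fun d k => pvAdd 1000000007 d k uc.2) d)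
    ([a, -b].foldl (fun d k => pvAdd 1000000007 d k 1) PySem.Dict.empty)

theorem pvmod_eq (x : Int) : PySem.Int.mod x 1000000007 = x % 1000000007 :=
  PySem.Int.mod_eq_emod_of_pos (h := by norm_num)

theorem pvGetD_nonneg {α : Type} (xs : List α) (i : Int) (d : α) (h0 : 0 ≤ i) :
    PySem.List.pyGetD xs i d = xs.getD i.toNat d := by
  obtain ⟨n, rfl⟩ := Int.eq_ofNat_of_zero_le h0
  simp

theorem pvGetD_set {α : Type} (xs : List α) (n m : Nat) (v d : α) :
    (xs.set n v).getD m d = if m = n ∧ n < xs.length then v else xs.getD m d := by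
  by_cases h : m = n ∧ n < xs.length
  · simp [h.1, List.getD_eq_getElem?_getD, h.2]
  · rcases Decidable.not_and_iff_not_or_not.mp h with h' | h'
    · simp [h, List.getD_eq_getElem?_getD, List.getElem?_set, if_neg (by omega : ¬ n = m)]
    · rw [List.set_eq_of_length_le (by omega), if_neg h]

theorem pvGetD_out {α : Type} (xs : List α) (m : Nat) (d : α) (h : xs.length ≤ m) :
    xs.getD m d = d := by
  rw [List.getD_eq_getElem?_getD, List.getElem?_eq_none (by simpa using h)]
  rfl

theorem pvAdd_getD (d : PySem.Dict Int Int) (k c v : Int) :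
    (pvAdd 1000000007 d k c).getD v 0 =
      if v = k then PySem.Int.mod (d.getD k 0 + c) 1000000007 else d.getD v 0 := by
  simp [pvAdd, PySem.Dict.getD_insert]

theorem pvAdd_nodup (md : Int) (d : PySem.Dict Int Int) (k c : Int) (h : d.keys.Nodup) :
    (pvAdd md d k c).keys.Nodup := PySem.Dict.nodup_keys_insert _ _ _ h

theorem pvSumItems (l : List (Int × Int)) (hnd : (l.map Prod.fst).Nodup) (k : Int) :
    (l.map (fun uc => if uc.1 = k then uc.2 else 0)).sum = (PySem.Dict.mk l).getD k 0 := by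
  induction l with
  | nil => simp [PySem.Dict.getD_eq_get?_getD, PySem.Dict.get?]
  | cons p rest ih =>
    simp at hnd
    rw [List.map_cons, List.sum_cons, PySem.Dict.getD_eq_get?_getD, PySem.Dict.get?_mk_cons]
    by_cases hp : p.1 = k
    · rw [if_pos hp, if_pos (by simpa using hp)]
      have hz : (rest.map (fun uc => if uc.1 = k then uc.2 else 0)).sum = 0 := by
        apply List.sum_eq_zero
        intro x hx
        simp at hx
        obtain ⟨u, c, hm, he⟩ := hx
        have : u ≠ k := by intro e; exact absurd hm (by subst e; subst hp; exact hnd.1 c)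
        simpa [this] using he.symm
      simp [hz]
    · rw [if_neg hp, if_neg (by simpa using hp), zero_add, ih hnd.2, PySem.Dict.getD_eq_get?_getD]

theorem pvFoldItems (a b : Int)
    (l : List (Int × Int)) (d : PySem.Dict Int Int)
    (hd : ∀ v : Int, 0 ≤ d.getD v 0 ∧ d.getD v 0 < 1000000007) (v : Int) :
    (l.foldl (fun d uc => [uc.1 + a, uc.1 - b].foldl (fun d k => pvAdd 1000000007 d k uc.2) d) d).getD v 0
      = PySem.Int.mod (d.getD v 0 +
          (l.map (fun uc => (if v = uc.1 + a then uc.2 else 0) +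
            (if v = uc.1 - b then uc.2 else 0))).sum) 1000000007 := by
  induction l generalizing d with
  | nil =>
    simp only [List.foldl_nil, List.map_nil, List.sum_nil, add_zero, pvmod_eq]
    have := hd v; omega
  | cons uc rest ih =>
    have hd' : ∀ w : Int, 0 ≤ (pvAdd 1000000007 (pvAdd 1000000007 d (uc.1 + a) uc.2) (uc.1 - b) uc.2).getD w 0 ∧
        (pvAdd 1000000007 (pvAdd 1000000007 d (uc.1 + a) uc.2) (uc.1 - b) uc.2).getD w 0 < 1000000007 := by
      intro w
      simp only [pvAdd_getD, pvmod_eq]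
      have h1 := hd w
      split_ifs <;> omega
    rw [List.foldl_cons, List.map_cons, List.sum_cons]
    show (rest.foldl _ ((pvAdd 1000000007 (pvAdd 1000000007 d (uc.1 + a) uc.2) (uc.1 - b) uc.2))).getD v 0 = _
    rw [ih _ hd']
    simp only [pvAdd_getD, pvmod_eq]
    by_cases h1 : v = uc.1 - b
    · subst h1
      by_cases h2 : uc.1 - b = uc.1 + a
      · rw [if_pos rfl, if_pos h2, if_pos (by omega), if_pos rfl, ← h2]
        omega
      · rw [if_pos rfl, if_neg h2, if_neg (by omega), if_pos rfl]
        omega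
    · by_cases h2 : v = uc.1 + a
      · subst h2
        rw [if_neg h1, if_pos rfl, if_pos rfl, if_neg (by omega)]
        omega
      · rw [if_neg h1, if_neg h2, if_neg h2, if_neg (by omega)]
        omega

theorem pvFoldItems_nodup (a b : Int) (l : List (Int × Int)) (d : PySem.Dict Int Int)
    (h : d.keys.Nodup) :
    (l.foldl (fun d uc => [uc.1 + a, uc.1 - b].foldl (fun d k => pvAdd 1000000007 d k uc.2) d) d).keys.Nodup := by
  induction l generalizing d with
  | nil => exact h
  | cons uc rest ih => exact ih _ (pvAdd_nodup _ _ _ _ (pvAdd_nodup _ _ _ _ h))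

theorem pvOnesDict_getD (a b v : Int) :
    ([a, -b].foldl (fun d k => pvAdd 1000000007 d k 1) PySem.Dict.empty).getD v 0 = pvOnes a b v := by
  simp only [List.foldl_cons, List.foldl_nil, pvAdd_getD, PySem.Dict.getD_empty, pvOnes, pvmod_eq]
  by_cases h1 : v = -b
  · subst h1
    by_cases h2 : -b = a
    · rw [if_pos rfl, if_pos h2, if_pos h2]; omega
    · rw [if_pos rfl, if_neg h2, if_neg h2]; omega
  · by_cases h2 : v = a
    · subst h2; rw [if_neg h1, if_pos rfl, if_pos rfl, if_neg h1]; omega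
    · rw [if_neg h1, if_neg h2, if_neg h2, if_neg h1]; omega

theorem pvOnesDict_nodup (a b : Int) :
    ([a, -b].foldl (fun d k => pvAdd 1000000007 d k 1) PySem.Dict.empty).keys.Nodup :=
  pvAdd_nodup _ _ _ _ (pvAdd_nodup _ _ _ _ (by simp))

theorem pvCur_getD (a b : Int) (p : PySem.Dict Int Int) (hnd : p.keys.Nodup) (v : Int) :
    (pvCur a b p).getD v 0
      = PySem.Int.mod (pvOnes a b v + (p.getD (v - a) 0 + p.getD (v + b) 0)) 1000000007 := by
  unfold pvCur
  have hd : ∀ w : Int, 0 ≤ ([a, -b].foldl (fun d k => pvAdd 1000000007 d k 1) PySem.Dict.empty).getD w 0 ∧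
      ([a, -b].foldl (fun d k => pvAdd 1000000007 d k 1) PySem.Dict.empty).getD w 0 < 1000000007 := by
    intro w; rw [pvOnesDict_getD]; unfold pvOnes; split_ifs <;> omega
  rw [pvFoldItems a b _ _ hd v, pvOnesDict_getD]
  congr 2
  rw [PySem.List.sum_map_add_int]
  have e1 : p.items.map (fun uc => if v = uc.1 + a then uc.2 else 0)
      = p.items.map (fun uc => if uc.1 = v - a then uc.2 else 0) := by
    apply List.map_congr_left; intro x _; congr 1; simp; constructor <;> intro h <;> omega
  have e2 : p.items.map (fun uc => if v = uc.1 - b then uc.2 else 0)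
      = p.items.map (fun uc => if uc.1 = v + b then uc.2 else 0) := by
    apply List.map_congr_left; intro x _; congr 1; simp; constructor <;> intro h <;> omega
  rw [e1, e2, pvSumItems _ hnd, pvSumItems _ hnd]

theorem pvCur_nodup (a b : Int) (p : PySem.Dict Int Int) :
    (pvCur a b p).keys.Nodup :=
  pvFoldItems_nodup _ _ _ _ (pvOnesDict_nodup a b)

theorem pvBody_length (a b s1 s2 : Int) (prev r : List Int) (j : Int) (h0 : 0 ≤ j) :
    (pvBody a b s1 s2 prev r j).length = r.length := by
  unfold pvBody
  split_ifs <;> simp [PySem.List.pySetD_of_nonneg (h := h0), List.length_set]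

theorem pvBody_getD (a b s1 s2 : Int) (prev r : List Int) (j : Int) (h0 : 0 ≤ j)
    (hlen : j.toNat < r.length) (k : Nat) :
    (pvBody a b s1 s2 prev r j).getD k 0 =
      if (k : Int) = j then pvRowStep a b s1 s2 1000000007 prev (r.getD j.toNat 0) j
      else r.getD k 0 := by
  unfold pvBody pvRowStep
  simp only [PySem.List.pySetD_of_nonneg (h := h0), pvGetD_nonneg _ _ _ h0]
  by_cases hk : (k:Int) = j
  · rw [if_pos hk]
    have hkj : k = j.toNat := by omega
    subst hkj
    by_cases c1 : j ≥ a <;> by_cases c2 : j + b < s1 + s2 + 1 <;>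
      simp [c1, c2, List.length_set, hlen]
  · rw [if_neg hk]
    have hkj : ¬ (k = j.toNat) := by omega
    by_cases c1 : j ≥ a <;> by_cases c2 : j + b < s1 + s2 + 1 <;>
      simp [c1, c2, List.length_set, hlen,
        show ¬ j.toNat = k from fun e => hkj e.symm]

theorem pvRowFold_length (a b s1 s2 : Int) (prev : List Int) (l : List Int)
    (hm : ∀ j ∈ l, 0 ≤ j) (r : List Int) :
    (l.foldl (pvBody a b s1 s2 prev) r).length = r.length := by
  induction l generalizing r with
  | nil => rfl
  | cons j rest ih =>
    rw [List.foldl_cons, ih (fun x hx => hm x (by simp [hx])),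
      pvBody_length _ _ _ _ _ _ _ (hm j (by simp))]

theorem pvRowFold_getD (a b s1 s2 : Int) (prev : List Int) (l : List Int) (hnd : l.Nodup)
    (hm : ∀ j ∈ l, 0 ≤ j ∧ j < s1 + s2 + 1) (r : List Int)
    (hrlen : r.length = (s1 + s2 + 1).toNat) (k : Nat) :
    (l.foldl (pvBody a b s1 s2 prev) r).getD k 0 =
      if (k : Int) ∈ l then pvRowStep a b s1 s2 1000000007 prev (r.getD k 0) (k : Int)
      else r.getD k 0 := by
  induction l generalizing r with
  | nil => simp
  | cons j rest ih =>
    have hj := hm j (by simp)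
    have hjlen : j.toNat < r.length := by omega
    rw [List.foldl_cons, ih (by simpa using hnd.of_cons) (fun x hx => hm x (by simp [hx])) _
      (by rw [pvBody_length _ _ _ _ _ _ _ hj.1, hrlen])]
    by_cases hkr : (k : Int) ∈ rest
    · have hkj : ¬ ((k:Int) = j) := by
        intro e; exact (List.nodup_cons.mp hnd).1 (e ▸ hkr)
      rw [if_pos hkr, if_pos (by simp [hkr]), pvBody_getD _ _ _ _ _ _ _ hj.1 hjlen, if_neg hkj]
    · rw [if_neg hkr, pvBody_getD _ _ _ _ _ _ _ hj.1 hjlen]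
      by_cases hkj : (k:Int) = j
      · rw [if_pos hkj, if_pos (by simp [hkj]), show j.toNat = k from by omega, hkj]
      · rw [if_neg hkj, if_neg (by simp [hkj, hkr])]

theorem pvRow2_length (s2 a b : Int) (base : List Int) (h1 : 0 ≤ a + s2) (h2 : 0 ≤ -b + s2) :
    (pvRow2 s2 a b base).length = base.length := by
  unfold pvRow2
  rw [PySem.List.pySetD_of_nonneg (h := h2), PySem.List.pySetD_of_nonneg (h := h1)]
  simp [List.length_set]

theorem pvInit_getD (s2 a b : Int) (len : Nat) (h1 : 0 ≤ a + s2) (h1' : (a + s2).toNat < len)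
    (h2 : 0 ≤ -b + s2) (h2' : (-b + s2).toNat < len) (k : Nat) :
    (pvRow2 s2 a b (List.replicate len (0:Int))).getD k 0
      = if k < len then pvOnes a b ((k : Int) - s2) else 0 := by
  unfold pvRow2
  simp only [PySem.List.pySetD_of_nonneg (h := h1), PySem.List.pySetD_of_nonneg (h := h2),
    pvGetD_nonneg _ _ _ h1, pvGetD_nonneg _ _ _ h2, pvGetD_set, pvOnes]
  have hr3 : ∀ m : Nat, (List.replicate len (0:Int)).getD m 0 = 0 := by
    intro m
    by_cases hm : m < len
    · simp [List.getD_eq_getElem?_getD, hm]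
    · rw [List.getD_eq_getElem?_getD, List.getElem?_eq_none (by simpa using hm)]
      rfl
  simp only [List.length_set, List.length_replicate, hr3]
  split_ifs <;> omega


theorem pvRange_nodup (m : Int) (hm : 0 ≤ m) : (PySem.List.pyRange 0 m 1).Nodup := by
  have : m = ((m.toNat : Nat) : Int) := by omega
  rw [this, PySem.List.pyRange_zero_natCast]
  exact List.Nodup.map (fun x y e => by omega) (List.nodup_range)

theorem pvStep0 (s1 s2 a b : Int) (len : Nat) (row : List Int)
    (ha : 0 ≤ a) (hb : 0 ≤ b)
    (haS : a ≤ s1) (hbS : b ≤ s2) (hlenE : (len : Int) = s1 + s2 + 1)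
    (hrow : ∀ m : Nat, row.getD m 0 = if m < len then pvOnes a b ((m : Int) - s2) else 0)
    (hrl : row.length = len) (v : Int) :
    pvOnes a b v = pvAval s2 row v := by
  unfold pvAval
  by_cases h0 : 0 ≤ v + s2
  · rw [if_pos h0, hrow]
    by_cases h1 : (v + s2).toNat < len
    · rw [if_pos h1]
      congr 1
      omega
    · rw [if_neg h1]
      unfold pvOnes
      split_ifs <;> omega
  · rw [if_neg h0]
    unfold pvOnes
    split_ifs <;> omega

theorem pvStepKey (s1 s2 a b P1 P2 : Int) (p : PySem.Dict Int Int) (prow row2 : List Int)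
    (hs1 : 0 ≤ s1) (hs2 : 0 ≤ s2) (ha : 0 ≤ a) (hb : 0 ≤ b)
    (hP1 : 0 ≤ P1) (hP2 : 0 ≤ P2) (haS : P1 + a ≤ s1) (hbS : P2 + b ≤ s2)
    (hvals : ∀ v : Int, 0 ≤ p.getD v 0 ∧ p.getD v 0 < 1000000007)
    (hsupp : ∀ v : Int, p.getD v 0 ≠ 0 → (-P2 ≤ v ∧ v ≤ P1))
    (hrelv : ∀ v : Int, p.getD v 0 = pvAval s2 prow v)
    (hprl : prow.length = (s1 + s2 + 1).toNat)
    (hrow2 : ∀ m : Nat, row2.getD m 0 =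
      if m < (s1 + s2 + 1).toNat then pvOnes a b ((m : Int) - s2) else 0)
    (hr2l : row2.length = (s1 + s2 + 1).toNat) (v : Int) :
    PySem.Int.mod (pvOnes a b v + (p.getD (v - a) 0 + p.getD (v + b) 0)) 1000000007
      = pvAval s2 ((PySem.List.pyRange 0 (s1 + s2 + 1) 1).foldl (pvBody a b s1 s2 prow) row2) v := by
  have hmem : ∀ j ∈ PySem.List.pyRange 0 (s1 + s2 + 1) 1, 0 ≤ j ∧ j < s1 + s2 + 1 := by
    intro j hj; exact PySem.List.mem_pyRange_one.mp hj
  have hfold := pvRowFold_getD a b s1 s2 prow _ (pvRange_nodup _ (by omega)) hmem row2 hr2l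
  have hflen : ((PySem.List.pyRange 0 (s1 + s2 + 1) 1).foldl (pvBody a b s1 s2 prow) row2).length
      = (s1 + s2 + 1).toNat := by
    rw [pvRowFold_length a b s1 s2 prow _ (fun j hj => (hmem j hj).1) row2, hr2l]
  have hpget : ∀ w : Int, 0 ≤ w + s2 → PySem.List.pyGetD prow (w + s2) 0 = p.getD w 0 := by
    intro w hw
    rw [pvGetD_nonneg _ _ _ hw, hrelv w, pvAval, if_pos hw]
  unfold pvAval
  by_cases h0 : 0 ≤ v + s2
  · rw [if_pos h0]
    by_cases h1 : v + s2 < s1 + s2 + 1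
    · rw [hfold, if_pos (by rw [PySem.List.mem_pyRange_one]; omega), hrow2,
        if_pos (by omega)]
      have hcast : ((v + s2).toNat : Int) = v + s2 := by omega
      unfold pvRowStep
      rw [hcast, show v + s2 - s2 = v from by omega]
      by_cases c1 : v + s2 ≥ a
      · rw [if_pos c1, show v + s2 - a = (v - a) + s2 from by omega, hpget _ (by omega)]
        by_cases c2 : v + s2 + b < s1 + s2 + 1
        · rw [if_pos c2, show v + s2 + b = (v + b) + s2 from by omega, hpget _ (by omega)]
          simp only [pvmod_eq]
          have := hvals (v - a); have := hvals (v + b)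
          have ho : 0 ≤ pvOnes a b v ∧ pvOnes a b v ≤ 2 := by unfold pvOnes; split_ifs <;> omega
          omega
        · rw [if_neg c2]
          have hz : p.getD (v + b) 0 = 0 := by
            rw [hrelv, pvAval, if_pos (by omega), pvGetD_out _ _ _ (by omega)]
          rw [hz]
          simp only [pvmod_eq]
          have := hvals (v - a)
          have ho : 0 ≤ pvOnes a b v ∧ pvOnes a b v ≤ 2 := by unfold pvOnes; split_ifs <;> omega
          omega
      · rw [if_neg c1]
        have hz1 : p.getD (v - a) 0 = 0 := by
          rw [hrelv, pvAval, if_neg (by omega)]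
        by_cases c2 : v + s2 + b < s1 + s2 + 1
        · rw [if_pos c2, show v + s2 + b = (v + b) + s2 from by omega, hpget _ (by omega), hz1]
          simp only [pvmod_eq]
          have := hvals (v + b)
          have ho : 0 ≤ pvOnes a b v ∧ pvOnes a b v ≤ 2 := by unfold pvOnes; split_ifs <;> omega
          omega
        · rw [if_neg c2, hz1]
          have hz2 : p.getD (v + b) 0 = 0 := by
            rw [hrelv, pvAval, if_pos (by omega), pvGetD_out _ _ _ (by omega)]
          rw [hz2]
          simp only [pvmod_eq]
          have ho : 0 ≤ pvOnes a b v ∧ pvOnes a b v ≤ 2 := by unfold pvOnes; split_ifs <;> omega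
          omega
    · rw [pvGetD_out _ _ _ (by omega)]
      have ho : pvOnes a b v = 0 := by unfold pvOnes; split_ifs <;> omega
      have hz1 : p.getD (v - a) 0 = 0 := by
        by_contra hne
        have := hsupp _ hne
        omega
      have hz2 : p.getD (v + b) 0 = 0 := by
        by_contra hne
        have := hsupp _ hne
        omega
      rw [ho, hz1, hz2]
      simp
  · rw [if_neg h0]
    have ho : pvOnes a b v = 0 := by unfold pvOnes; split_ifs <;> omega
    have hz1 : p.getD (v - a) 0 = 0 := by
      by_contra hne
      have := hsupp _ hne
      omega
    have hz2 : p.getD (v + b) 0 = 0 := by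
      by_contra hne
      have := hsupp _ hne
      omega
    rw [ho, hz1, hz2]
    simp

theorem pvMain (s1 s2 : Int) (n : Nat)
    (zs : List (Int × Int)) (k : Nat) (f : List (List Int)) (p : PySem.Dict Int Int)
    (ans P1 P2 : Int)
    (hz : ∀ z ∈ zs, 0 ≤ z.1 ∧ 0 ≤ z.2)
    (hP1 : 0 ≤ P1) (hP2 : 0 ≤ P2)
    (hS1 : P1 + (zs.map Prod.fst).sum ≤ s1)
    (hS2 : P2 + (zs.map Prod.snd).sum ≤ s2)
    (hs1 : 0 ≤ s1) (hs2 : 0 ≤ s2)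
    (hn : k + zs.length ≤ n)
    (hf : f.length = n)
    (hzero : ∀ r : Nat, k ≤ r → r < n → f.getD r [] = List.replicate (s1 + s2 + 1).toNat (0:Int))
    (hnd : p.keys.Nodup)
    (hvals : ∀ v : Int, 0 ≤ p.getD v 0 ∧ p.getD v 0 < 1000000007)
    (hsupp : ∀ v : Int, p.getD v 0 ≠ 0 → (-P2 ≤ v ∧ v ≤ P1))
    (hrel : k ≠ 0 → ((f.getD (k - 1) []).length = (s1 + s2 + 1).toNat ∧
        ∀ v : Int, p.getD v 0 = pvAval s2 (f.getD (k - 1) []) v))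
    (hk0 : k = 0 → p = PySem.Dict.empty) :
    ((PySem.List.enumerate zs (k : Int)).foldl
      (fun (st : List (List Int) × Int) iab =>
        let f := st.1
        let i := iab.1; let a := iab.2.1; let b := iab.2.2
        let row := PySem.List.pyGetD f i []
        let row := PySem.List.pySetD row (a + s2) (PySem.List.pyGetD row (a + s2) 0 + 1)
        let row := PySem.List.pySetD row (-b + s2) (PySem.List.pyGetD row (-b + s2) 0 + 1)
        let row := if i ≠ 0 then
            (PySem.List.pyRange 0 (s1 + s2 + 1) 1).foldl (fun r j =>
              let r1 := if j ≥ a then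
                  PySem.List.pySetD r j (PySem.Int.mod (PySem.List.pyGetD r j 0 +
                    PySem.List.pyGetD (PySem.List.pyGetD f (i - 1) []) (j - a) 0) 1000000007)
                else r
              if j + b < s1 + s2 + 1 then
                  PySem.List.pySetD r1 j (PySem.Int.mod (PySem.List.pyGetD r1 j 0 +
                    PySem.List.pyGetD (PySem.List.pyGetD f (i - 1) []) (j + b) 0) 1000000007)
                else r1) row
          else row
        let f := PySem.List.pySetD f i row
        (f, PySem.Int.mod (st.2 + PySem.List.pyGetD row s2 0) 1000000007)) (f, ans)).2
    = (zs.foldl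
      (fun (st : PySem.Dict Int Int × Int) ab =>
        let cur := [ab.1, -ab.2].foldl (fun d k => pvAdd 1000000007 d k 1) PySem.Dict.empty
        let cur := st.1.items.foldl
          (fun d uc => [uc.1 + ab.1, uc.1 - ab.2].foldl (fun d k => pvAdd 1000000007 d k uc.2) d) cur
        (cur, PySem.Int.mod (st.2 + cur.getD 0 0) 1000000007)) (p, ans)).2 := by
  induction zs generalizing k f p ans P1 P2 with
  | nil => simp [PySem.List.enumerate_nil]
  | cons z rest ih =>
    obtain ⟨a, b⟩ := z
    have ha : 0 ≤ a := (hz (a, b) (by simp)).1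
    have hb : 0 ≤ b := (hz (a, b) (by simp)).2
    have hrest1 : 0 ≤ (rest.map Prod.fst).sum := by
      apply List.sum_nonneg; intro x hx
      simp at hx; obtain ⟨c, hc⟩ := hx
      have := hz (x, c) (by simp [hc])
      exact this.1
    have hrest2 : 0 ≤ (rest.map Prod.snd).sum := by
      apply List.sum_nonneg; intro x hx
      simp at hx; obtain ⟨c, hc⟩ := hx
      have := hz (c, x) (by simp [hc])
      exact this.2
    simp only [List.map_cons, List.sum_cons] at hS1 hS2
    simp only [List.length_cons] at hn
    have haS : P1 + a ≤ s1 := by omega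
    have hbS : P2 + b ≤ s2 := by omega
    rw [PySem.List.enumerate_cons, List.foldl_cons, List.foldl_cons]
    show (List.foldl
      (fun (st : List (List Int) × Int) iab =>
        let f := st.1
        let i := iab.1; let a := iab.2.1; let b := iab.2.2
        let row := PySem.List.pyGetD f i []
        let row := PySem.List.pySetD row (a + s2) (PySem.List.pyGetD row (a + s2) 0 + 1)
        let row := PySem.List.pySetD row (-b + s2) (PySem.List.pyGetD row (-b + s2) 0 + 1)
        let row := if i ≠ 0 then
            (PySem.List.pyRange 0 (s1 + s2 + 1) 1).foldl (fun r j =>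
              let r1 := if j ≥ a then
                  PySem.List.pySetD r j (PySem.Int.mod (PySem.List.pyGetD r j 0 +
                    PySem.List.pyGetD (PySem.List.pyGetD f (i - 1) []) (j - a) 0) 1000000007)
                else r
              if j + b < s1 + s2 + 1 then
                  PySem.List.pySetD r1 j (PySem.Int.mod (PySem.List.pyGetD r1 j 0 +
                    PySem.List.pyGetD (PySem.List.pyGetD f (i - 1) []) (j + b) 0) 1000000007)
                else r1) row
          else row
        let f := PySem.List.pySetD f i row
        (f, PySem.Int.mod (st.2 + PySem.List.pyGetD row s2 0) 1000000007))
      (PySem.List.pySetD f ((k : Nat) : Int) (pvRow3 s1 s2 a b f ((k : Nat) : Int)),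
        PySem.Int.mod (ans + PySem.List.pyGetD (pvRow3 s1 s2 a b f ((k : Nat) : Int)) s2 0) 1000000007)
      (PySem.List.enumerate rest (((k : Nat) : Int) + 1))).2
      = (List.foldl
      (fun (st : PySem.Dict Int Int × Int) ab =>
        let cur := [ab.1, -ab.2].foldl (fun d k => pvAdd 1000000007 d k 1) PySem.Dict.empty
        let cur := st.1.items.foldl
          (fun d uc => [uc.1 + ab.1, uc.1 - ab.2].foldl (fun d k => pvAdd 1000000007 d k uc.2) d) cur
        (cur, PySem.Int.mod (st.2 + cur.getD 0 0) 1000000007))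
      (pvCur a b p, PySem.Int.mod (ans + (pvCur a b p).getD 0 0) 1000000007) rest).2
    have hfk : PySem.List.pyGetD f ((k : Nat) : Int) [] = List.replicate (s1 + s2 + 1).toNat (0:Int) := by
      rw [pvGetD_nonneg _ _ _ (by positivity)]
      simpa using hzero k le_rfl (by omega)
    have h1b : 0 ≤ a + s2 := by omega
    have h2b : 0 ≤ -b + s2 := by omega
    have hrow2 : ∀ m : Nat, (pvRow2 s2 a b (PySem.List.pyGetD f ((k : Nat) : Int) [])).getD m 0
        = if m < (s1 + s2 + 1).toNat then pvOnes a b ((m : Int) - s2) else 0 := by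
      intro m
      rw [hfk]
      exact pvInit_getD s2 a b _ h1b (by omega) h2b (by omega) m
    have hrow2l : (pvRow2 s2 a b (PySem.List.pyGetD f ((k : Nat) : Int) [])).length
        = (s1 + s2 + 1).toNat := by
      rw [pvRow2_length _ _ _ _ h1b h2b, hfk, List.length_replicate]
    by_cases hk : k = 0
    · subst hk
      have hp : p = PySem.Dict.empty := hk0 rfl
      subst hp
      have hrow3 : pvRow3 s1 s2 a b f (((0:Nat) : Nat) : Int)
          = pvRow2 s2 a b (PySem.List.pyGetD f (((0:Nat) : Nat) : Int) []) := by
        unfold pvRow3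
        rw [if_neg (by simp)]
      rw [hrow3]
      have hcure : pvCur a b PySem.Dict.empty
          = [a, -b].foldl (fun d k => pvAdd 1000000007 d k 1) PySem.Dict.empty := rfl
      have hansA : PySem.List.pyGetD (pvRow2 s2 a b (PySem.List.pyGetD f (((0:Nat):Nat) : Int) [])) s2 0
          = pvOnes a b 0 := by
        rw [pvGetD_nonneg _ _ _ hs2, hrow2 s2.toNat, if_pos (by omega),
          show ((s2.toNat : Int) - s2) = 0 from by omega]
      have hansB : (pvCur a b PySem.Dict.empty).getD 0 0 = pvOnes a b 0 := by
        rw [hcure, pvOnesDict_getD]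
      rw [hansA, hansB, show (((0:Nat) : Int) + 1) = ((1 : Nat) : Int) from by norm_num]
      refine ih 1 _ _ _ a b (fun z hzz => hz z (by simp [hzz])) ha hb (by omega) (by omega)
        (by omega) ?_ ?_ ?_ ?_ ?_ ?_ (by omega)
      · rw [PySem.List.pySetD_of_nonneg (h := by positivity), List.length_set]
        exact hf
      · intro r h1r h2r
        rw [PySem.List.pySetD_of_nonneg (h := by positivity), pvGetD_set, if_neg (by omega)]
        exact hzero r (by omega) h2r
      · rw [hcure]
        exact pvOnesDict_nodup a b
      · intro v
        rw [hcure, pvOnesDict_getD]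
        unfold pvOnes
        split_ifs <;> omega
      · intro v hne
        rw [hcure, pvOnesDict_getD] at hne
        unfold pvOnes at hne
        split_ifs at hne <;> omega
      · intro _
        constructor
        · rw [PySem.List.pySetD_of_nonneg (h := by positivity), pvGetD_set, if_pos (by omega)]
          exact hrow2l
        · intro v
          rw [PySem.List.pySetD_of_nonneg (h := by positivity), pvGetD_set, if_pos (by omega),
            hcure, pvOnesDict_getD]
          exact pvStep0 s1 s2 a b _ _ ha hb (by omega) (by omega) (by omega) hrow2 hrow2l v
    · obtain ⟨hprl, hrelv⟩ := hrel hk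
      have hprev : PySem.List.pyGetD f (((k : Nat) : Int) - 1) [] = f.getD (k - 1) [] := by
        rw [show (((k : Nat) : Int) - 1) = (((k - 1 : Nat)) : Int) from by omega,
          pvGetD_nonneg _ _ _ (by positivity)]
        simp
      have hrow3e : pvRow3 s1 s2 a b f ((k : Nat) : Int)
          = (PySem.List.pyRange 0 (s1 + s2 + 1) 1).foldl
              (pvBody a b s1 s2 (f.getD (k - 1) []))
              (pvRow2 s2 a b (PySem.List.pyGetD f ((k : Nat) : Int) [])) := by
        unfold pvRow3
        rw [if_pos (by omega), hprev]
      rw [hrow3e]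
      have hmemr : ∀ j ∈ PySem.List.pyRange 0 (s1 + s2 + 1) 1, 0 ≤ j := by
        intro j hj; exact (PySem.List.mem_pyRange_one.mp hj).1
      have hrow3l : ((PySem.List.pyRange 0 (s1 + s2 + 1) 1).foldl
          (pvBody a b s1 s2 (f.getD (k - 1) []))
          (pvRow2 s2 a b (PySem.List.pyGetD f ((k : Nat) : Int) []))).length
          = (s1 + s2 + 1).toNat := by
        rw [pvRowFold_length _ _ _ _ _ _ hmemr, hrow2l]
      have hkey : ∀ v : Int, (pvCur a b p).getD v 0
          = pvAval s2 ((PySem.List.pyRange 0 (s1 + s2 + 1) 1).foldl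
              (pvBody a b s1 s2 (f.getD (k - 1) []))
              (pvRow2 s2 a b (PySem.List.pyGetD f ((k : Nat) : Int) []))) v := by
        intro v
        rw [pvCur_getD a b p hnd v]
        exact pvStepKey s1 s2 a b P1 P2 p _ _ hs1 hs2 ha hb hP1 hP2 haS hbS hvals hsupp hrelv
          hprl hrow2 hrow2l v
      have hansA : PySem.List.pyGetD ((PySem.List.pyRange 0 (s1 + s2 + 1) 1).foldl
          (pvBody a b s1 s2 (f.getD (k - 1) []))
          (pvRow2 s2 a b (PySem.List.pyGetD f ((k : Nat) : Int) []))) s2 0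
          = (pvCur a b p).getD 0 0 := by
        rw [pvGetD_nonneg _ _ _ hs2, hkey 0]
        unfold pvAval
        rw [if_pos (by omega)]
        norm_num
      rw [hansA, show (((k : Nat) : Int) + 1) = (((k + 1 : Nat)) : Int) from by push_cast; ring]
      refine ih (k + 1) _ _ _ (P1 + a) (P2 + b) (fun z hzz => hz z (by simp [hzz])) (by omega)
        (by omega) (by omega) (by omega) (by omega) ?_ ?_ ?_ ?_ ?_ ?_ (by omega)
      · rw [PySem.List.pySetD_of_nonneg (h := by positivity), List.length_set]
        exact hf
      · intro r h1r h2r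
        rw [PySem.List.pySetD_of_nonneg (h := by positivity), pvGetD_set, if_neg (by omega)]
        exact hzero r (by omega) h2r
      · exact pvCur_nodup a b p
      · intro v
        rw [pvCur_getD a b p hnd v]
        simp only [pvmod_eq]
        omega
      · intro v hne
        rw [pvCur_getD a b p hnd v] at hne
        have hov : pvOnes a b v ≠ 0 → (-b ≤ v ∧ v ≤ a) := by
          unfold pvOnes; split_ifs <;> omega
        by_cases z1 : pvOnes a b v = 0
        · by_cases z2 : p.getD (v - a) 0 = 0
          · have z3 : p.getD (v + b) 0 ≠ 0 := by
              intro z3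
              exact hne (by rw [z1, z2, z3]; simp)
            have := hsupp _ z3
            omega
          · have h2 := hsupp _ z2
            have h3 := hvals (v + b)
            have h4 : p.getD (v + b) 0 ≠ 0 → (-P2 ≤ v + b ∧ v + b ≤ P1) := hsupp _
            by_cases z3 : p.getD (v + b) 0 = 0
            · omega
            · have := hsupp _ z3; omega
        · have h2 := hov z1
          omega
      · intro _
        constructor
        · rw [PySem.List.pySetD_of_nonneg (h := by positivity),
            show (k + 1 - 1) = k from by omega, pvGetD_set, if_pos (by omega)]
          exact hrow3l
        · intro v
          rw [PySem.List.pySetD_of_nonneg (h := by positivity),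
            show (k + 1 - 1) = k from by omega, pvGetD_set, if_pos (by omega)]
          exact hkey v


theorem pvZipFstSum (l1 l2 : List Int) (h : ∀ x ∈ l1, 0 ≤ x) :
    ((List.zip l1 l2).map Prod.fst).sum ≤ l1.sum := by
  induction l1 generalizing l2 with
  | nil => simp
  | cons x xs ih =>
    cases l2 with
    | nil =>
      simp only [List.zip_nil_right, List.map_nil, List.sum_nil]
      exact List.sum_nonneg h
    | cons y ys =>
      simp only [List.zip_cons_cons, List.map_cons, List.sum_cons]
      have := ih ys (fun t ht => h t (by simp [ht]))
      omega

theorem pvZipSndSum (l1 l2 : List Int) (h : ∀ x ∈ l2, 0 ≤ x) :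
    ((List.zip l1 l2).map Prod.snd).sum ≤ l2.sum := by
  induction l1 generalizing l2 with
  | nil => simp; exact List.sum_nonneg h
  | cons x xs ih =>
    cases l2 with
    | nil => simp
    | cons y ys =>
      simp only [List.zip_cons_cons, List.map_cons, List.sum_cons]
      have := ih ys (fun t ht => h t (by simp [ht]))
      omega

-- ========== bridge: sequential sparse fold = per-start suffix enumeration ==========

-- B's starting counter {0: 1}
def pvD0 : PySem.Dict Int Int := PySem.Dict.empty.insert 0 1

-- B's per-element counter step (push each populated sum to sum+a and sum-b)
def pvPush (a b : Int) (p : PySem.Dict Int Int) : PySem.Dict Int Int :=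
  p.items.foldl (fun d sc => [sc.1 + a, sc.1 - b].foldl (fun d t => pvAdd 1000000007 d t sc.2) d)
    PySem.Dict.empty

-- unreduced total of zero-hits when extending counter q through a suffix
def pvExt (q : PySem.Dict Int Int) : List (Int × Int) → Int
  | [] => 0
  | ab :: rest => (pvPush ab.1 ab.2 q).getD 0 0 + pvExt (pvPush ab.1 ab.2 q) rest

-- unreduced total of all zero-hits of the interleaved computation: at each step the active
-- per-start counters L are pushed, a fresh start is added, and the zero-entries are summed
def pvContrib : List (Int × Int) → List (PySem.Dict Int Int) → Int
  | [], _ => 0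
  | ab :: rest, L =>
    ((pvPush ab.1 ab.2 pvD0 :: L.map (pvPush ab.1 ab.2)).map (fun q => q.getD 0 0)).sum
      + pvContrib rest (pvPush ab.1 ab.2 pvD0 :: L.map (pvPush ab.1 ab.2))

-- unreduced total of B's suffix enumeration
def pvS0 : List (Int × Int) → Int
  | [] => 0
  | z :: rest => pvExt pvD0 (z :: rest) + pvS0 rest

theorem pvm1 (x y : Int) : (x + y % 1000000007) % 1000000007 = (x + y) % 1000000007 := by
  conv_rhs => rw [Int.add_emod]
  rw [Int.add_emod x (y % 1000000007), Int.emod_emod_of_dvd _ dvd_rfl]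

theorem pvm2 (x y : Int) : (x % 1000000007 + y) % 1000000007 = (x + y) % 1000000007 := by
  rw [add_comm, pvm1, add_comm]

theorem pvm3 (x y z : Int) :
    (x + (y % 1000000007 + z % 1000000007)) % 1000000007 = (x + (y + z)) % 1000000007 := by
  rw [show x + (y % 1000000007 + z % 1000000007)
      = (x + y % 1000000007) + z % 1000000007 from by ring, pvm1,
    show x + y % 1000000007 + z = (x + z) + y % 1000000007 from by ring, pvm1]
  ring_nf

theorem pvModMapSum (l : List (PySem.Dict Int Int)) (f g : PySem.Dict Int Int → Int)
    (h : ∀ q ∈ l, f q = g q % 1000000007) :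
    (l.map f).sum % 1000000007 = (l.map g).sum % 1000000007 := by
  induction l with
  | nil => rfl
  | cons q rest ih =>
    simp only [List.map_cons, List.sum_cons]
    rw [h q (by simp), pvm2, Int.add_emod, ih (fun x hx => h x (by simp [hx])), ← Int.add_emod]

theorem pvD0_nodup : pvD0.keys.Nodup := by
  unfold pvD0
  exact PySem.Dict.nodup_keys_insert _ _ _ (by simp)

theorem pvD0_getD (v : Int) : pvD0.getD v 0 = if v = 0 then 1 else 0 := by
  unfold pvD0
  rw [PySem.Dict.getD_insert]
  simp [PySem.Dict.getD_empty]

theorem pvPush_getD (a b : Int) (p : PySem.Dict Int Int) (hnd : p.keys.Nodup) (v : Int) :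
    (pvPush a b p).getD v 0 = (p.getD (v - a) 0 + p.getD (v + b) 0) % 1000000007 := by
  unfold pvPush
  have hd : ∀ w : Int, 0 ≤ (PySem.Dict.empty : PySem.Dict Int Int).getD w 0 ∧
      (PySem.Dict.empty : PySem.Dict Int Int).getD w 0 < 1000000007 := by
    intro w; rw [PySem.Dict.getD_empty]; omega
  rw [pvFoldItems a b _ _ hd v, PySem.Dict.getD_empty, zero_add, pvmod_eq]
  congr 1
  rw [PySem.List.sum_map_add_int]
  have e1 : p.items.map (fun uc => if v = uc.1 + a then uc.2 else 0)
      = p.items.map (fun uc => if uc.1 = v - a then uc.2 else 0) := by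
    apply List.map_congr_left; intro x _; congr 1; simp; constructor <;> intro h <;> omega
  have e2 : p.items.map (fun uc => if v = uc.1 - b then uc.2 else 0)
      = p.items.map (fun uc => if uc.1 = v + b then uc.2 else 0) := by
    apply List.map_congr_left; intro x _; congr 1; simp; constructor <;> intro h <;> omega
  rw [e1, e2, pvSumItems _ hnd, pvSumItems _ hnd]

theorem pvPush_nodup (a b : Int) (p : PySem.Dict Int Int) : (pvPush a b p).keys.Nodup :=
  pvFoldItems_nodup _ _ _ _ (by simp)

theorem pvPushD0_getD (a b v : Int) : (pvPush a b pvD0).getD v 0 = pvOnes a b v := by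
  rw [pvPush_getD a b pvD0 pvD0_nodup, pvD0_getD, pvD0_getD]
  unfold pvOnes
  by_cases h1 : v = a <;> by_cases h2 : v = -b
  · rw [if_pos (by omega), if_pos (by omega), if_pos h1, if_pos h2]; norm_num
  · rw [if_pos (by omega), if_neg (by omega), if_pos h1, if_neg h2]; norm_num
  · rw [if_neg (by omega), if_pos (by omega), if_neg h1, if_pos h2]; norm_num
  · rw [if_neg (by omega), if_neg (by omega), if_neg h1, if_neg h2]; norm_num

-- seq fold from state (p, ans) computes ans + remaining interleaved contributions, mod p
theorem pvSeqContrib (zs : List (Int × Int)) (L : List (PySem.Dict Int Int))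
    (p : PySem.Dict Int Int) (ans : Int)
    (hLnd : ∀ q ∈ L, q.keys.Nodup)
    (hpL : ∀ v : Int, p.getD v 0 = ((L.map (fun q => q.getD v 0)).sum) % 1000000007)
    (hpnd : p.keys.Nodup)
    (hans : 0 ≤ ans ∧ ans < 1000000007) :
    ((zs.foldl
      (fun (st : PySem.Dict Int Int × Int) ab =>
        let cur := [ab.1, -ab.2].foldl (fun d k => pvAdd 1000000007 d k 1) PySem.Dict.empty
        let cur := st.1.items.foldl
          (fun d uc => [uc.1 + ab.1, uc.1 - ab.2].foldl (fun d k => pvAdd 1000000007 d k uc.2) d) cur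
        (cur, PySem.Int.mod (st.2 + cur.getD 0 0) 1000000007)) (p, ans)).2)
    = (ans + pvContrib zs L) % 1000000007 := by
  induction zs generalizing L p ans with
  | nil =>
    simp only [List.foldl_nil, pvContrib, add_zero]
    omega
  | cons z rest ih =>
    obtain ⟨a, b⟩ := z
    rw [List.foldl_cons]
    show (rest.foldl _ (pvCur a b p, PySem.Int.mod (ans + (pvCur a b p).getD 0 0) 1000000007)).2 = _
    have hL' : ∀ q ∈ (pvPush a b pvD0 :: L.map (pvPush a b)), q.keys.Nodup := by
      intro q hq
      simp at hq
      rcases hq with h | ⟨r, _, h⟩ <;> subst h <;> exact pvPush_nodup _ _ _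
    have hcurL : ∀ v : Int, (pvCur a b p).getD v 0
        = (((pvPush a b pvD0 :: L.map (pvPush a b)).map (fun q => q.getD v 0)).sum) % 1000000007 := by
      intro v
      rw [pvCur_getD a b p hpnd v, pvmod_eq, hpL (v - a), hpL (v + b)]
      simp only [List.map_cons, List.sum_cons, List.map_map, pvPushD0_getD]
      rw [pvm3]
      have hT : (L.map ((fun q => q.getD v 0) ∘ pvPush a b)).sum % 1000000007
          = (L.map (fun q => q.getD (v - a) 0 + q.getD (v + b) 0)).sum % 1000000007 :=
        pvModMapSum L _ _ (fun q hq => pvPush_getD a b q (hLnd q hq) v)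
      conv_rhs => rw [Int.add_emod]
      rw [hT, PySem.List.sum_map_add_int]
      conv_rhs => rw [← Int.add_emod]
    have hcnd : (pvCur a b p).keys.Nodup := pvCur_nodup a b p
    have hans' : 0 ≤ PySem.Int.mod (ans + (pvCur a b p).getD 0 0) 1000000007 ∧
        PySem.Int.mod (ans + (pvCur a b p).getD 0 0) 1000000007 < 1000000007 := by
      rw [pvmod_eq]
      constructor
      · exact Int.emod_nonneg _ (by norm_num)
      · exact Int.emod_lt_of_pos _ (by norm_num)
    rw [ih _ _ _ hL' hcurL hcnd hans']
    rw [pvmod_eq, pvm2, hcurL 0]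
    show (ans + _ % 1000000007 + pvContrib rest _) % 1000000007 = _
    rw [show ans + ((pvPush a b pvD0 :: L.map (pvPush a b)).map (fun q => q.getD 0 0)).sum % 1000000007
          + pvContrib rest (pvPush a b pvD0 :: L.map (pvPush a b))
        = (ans + pvContrib rest (pvPush a b pvD0 :: L.map (pvPush a b)))
          + ((pvPush a b pvD0 :: L.map (pvPush a b)).map (fun q => q.getD 0 0)).sum % 1000000007
          from by ring, pvm1]
    show _ = (ans + pvContrib ((a, b) :: rest) L) % 1000000007
    simp only [pvContrib]
    ring_nf

-- the interleaved total splits into extensions of the active counters plus fresh starts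
theorem pvContrib_split (zs : List (Int × Int)) (L : List (PySem.Dict Int Int)) :
    pvContrib zs L = (L.map (fun q => pvExt q zs)).sum + pvContrib zs [] := by
  induction zs generalizing L with
  | nil => simp [pvContrib, pvExt, List.sum_eq_zero]
  | cons z rest ih =>
    obtain ⟨a, b⟩ := z
    simp only [pvContrib, List.map_cons, List.sum_cons, List.map_map, List.map_nil,
      List.sum_nil, add_zero]
    rw [ih (pvPush a b pvD0 :: L.map (pvPush a b)), ih [pvPush a b pvD0]]
    simp only [List.map_cons, List.sum_cons, List.map_map, List.map_nil, List.sum_nil, add_zero]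
    have h1 : (L.map ((fun q => q.getD 0 0) ∘ pvPush a b)).sum
        + (L.map ((fun q => pvExt q rest) ∘ pvPush a b)).sum
        = (L.map (fun q => pvExt q ((a, b) :: rest))).sum := by
      rw [← PySem.List.sum_map_add_int]
      apply congrArg
      apply List.map_congr_left
      intro q _
      simp [pvExt, Function.comp]
    have h2 := h1
    simp only [Function.comp_def] at h1
    linarith [h1]

theorem pvContrib_nil_eq_S0 (zs : List (Int × Int)) : pvContrib zs [] = pvS0 zs := by
  induction zs with
  | nil => rfl
  | cons z rest ih =>
    obtain ⟨a, b⟩ := z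
    simp only [pvContrib, List.map_nil, List.map_cons, List.sum_cons, List.sum_nil, add_zero]
    rw [pvContrib_split rest [pvPush a b pvD0], ih]
    simp only [List.map_cons, List.sum_cons, List.map_nil, List.sum_nil, add_zero, pvS0, pvExt]
    ring

-- Source B's inner loop: running counter q and reduced total t
theorem pvCountFrom_aux (s : List (Int × Int)) (q : PySem.Dict Int Int) (t : Int)
    (ht : 0 ≤ t ∧ t < 1000000007) :
    (s.foldl
      (fun (st : PySem.Dict Int Int × Int) ab =>
        let nxt := st.1.items.foldl
          (fun d sc => [sc.1 + ab.1, sc.1 - ab.2].foldl (fun d t => pvAdd 1000000007 d t sc.2) d)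
          PySem.Dict.empty
        (nxt, PySem.Int.mod (st.2 + nxt.getD 0 0) 1000000007)) (q, t)).2
    = (t + pvExt q s) % 1000000007 := by
  induction s generalizing q t with
  | nil => simp only [List.foldl_nil, pvExt, add_zero]; omega
  | cons z rest ih =>
    obtain ⟨a, b⟩ := z
    rw [List.foldl_cons]
    show (rest.foldl _ (pvPush a b q, PySem.Int.mod (t + (pvPush a b q).getD 0 0) 1000000007)).2 = _
    have ht' : 0 ≤ PySem.Int.mod (t + (pvPush a b q).getD 0 0) 1000000007 ∧
        PySem.Int.mod (t + (pvPush a b q).getD 0 0) 1000000007 < 1000000007 := by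
      rw [pvmod_eq]
      exact ⟨Int.emod_nonneg _ (by norm_num), Int.emod_lt_of_pos _ (by norm_num)⟩
    rw [ih _ _ ht', pvmod_eq, pvm2]
    simp only [pvExt]
    ring_nf

theorem pvCountFrom_eq (s : List (Int × Int)) :
    pvCountFrom 1000000007 s = pvExt pvD0 s % 1000000007 := by
  unfold pvCountFrom
  rw [pvCountFrom_aux s (PySem.Dict.empty.insert 0 1) 0 (by norm_num)]
  show (0 + pvExt pvD0 s) % 1000000007 = _
  rw [zero_add]

theorem pvGo_eq (s : List (Int × Int)) (ans : Int) (hans : 0 ≤ ans ∧ ans < 1000000007) :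
    pvGo 1000000007 s ans = (ans + pvS0 s) % 1000000007 := by
  induction s generalizing ans with
  | nil => simp only [pvGo, pvS0, add_zero]; omega
  | cons z rest ih =>
    rw [pvGo, ih _ (by rw [pvmod_eq]; exact ⟨Int.emod_nonneg _ (by norm_num),
      Int.emod_lt_of_pos _ (by norm_num)⟩)]
    rw [pvmod_eq, pvCountFrom_eq, pvm1, pvm2]
    simp only [pvS0]
    ring_nf

-- ===== VERDICT (by name: the statement is the Claim_ definition above) =====
theorem countSubranges_spec : Claim_equal_countSubranges := by
  unfold Claim_equal_countSubranges
  intro nums1 nums2 _ hpre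
  obtain ⟨h1, h2⟩ := hpre
  unfold Spec_countSubranges countSubranges countSubranges_alt
  have hs1 : 0 ≤ nums1.sum := List.sum_nonneg h1
  have hs2 : 0 ≤ nums2.sum := List.sum_nonneg h2
  have hA := pvMain nums1.sum nums2.sum nums1.length (List.zip nums1 nums2) 0
    (List.replicate nums1.length (List.replicate (nums1.sum + nums2.sum + 1).toNat 0))
    PySem.Dict.empty 0 0 0
    (fun z hzz => ⟨h1 z.1 (List.of_mem_zip hzz).1, h2 z.2 (List.of_mem_zip hzz).2⟩)
    le_rfl le_rfl
    (by simpa using pvZipFstSum nums1 nums2 h1)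
    (by simpa using pvZipSndSum nums1 nums2 h2)
    hs1 hs2
    (by simp [List.length_zip])
    (by simp)
    (fun r _ hr => by simp [List.getD_eq_getElem?_getD, hr])
    (by simp)
    (fun v => by rw [PySem.Dict.getD_empty]; omega)
    (fun v hv => absurd (PySem.Dict.getD_empty v 0) hv)
    (fun hne => absurd rfl hne)
    (fun _ => rfl)
  refine Eq.trans hA ?_
  rw [pvSeqContrib (List.zip nums1 nums2) [] PySem.Dict.empty 0
    (by simp)
    (fun v => by simp [PySem.Dict.getD_empty])
    (by simp)
    (by norm_num)]
  rw [pvGo_eq _ 0 (by norm_num), pvContrib_nil_eq_S0, zero_add]
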